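-- pv_equiv track=rewrite | github.com/SamEthanMathew/PokerAI-Hackathon-2026 | submission/lambdaV1.py | _bucket_opp_discard
-- ===== SOURCE A (Python) =====
-- from collections import Counter
--
-- NUM_RANKS = 9
--
-- RANK_A    = 8
--
-- def _rank(c):
--     return c % NUM_RANKS
--
-- def _suit(c):
--     return c // NUM_RANKS
--
-- def _bucket_opp_discard(opp_discards):
--     if len(opp_discards) < 3:
--         return "unknown"
--     ranks    = [_rank(c) for c in opp_discards]
--     suits    = [_suit(c) for c in opp_discards]
--     sc       = Counter(suits)
--     rc       = Counter(ranks)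
--     sorted_r = sorted(ranks)
--     conn = sum(1 for i in range(len(sorted_r) - 1)
--                if sorted_r[i + 1] - sorted_r[i] == 1)
--     if RANK_A in sorted_r and 0 in sorted_r:
--         conn += 1
--     if rc.most_common(1)[0][1] >= 2:  return "discarded_pair"
--     if sc.most_common(1)[0][1] >= 2:  return "suited_cluster"
--     if conn >= 2:                      return "connected_cluster"
--     if RANK_A in ranks:                return "high_junk"
--     if max(ranks) <= 5:                return "low_junk"
--     return "mixed_discard"
-- ===== SOURCE B (Python) =====
-- NUM_RANKS = 9
-- RANK_A = 8
--
-- def _bucket_opp_discard(opp_discards):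
--     if len(opp_discards) < 3:
--         return "unknown"
--     rank_cnt = {}
--     suit_cnt = {}
--     for c in opp_discards:
--         r = c % NUM_RANKS
--         rank_cnt[r] = rank_cnt.get(r, 0) + 1
--         s = c // NUM_RANKS
--         suit_cnt[s] = suit_cnt.get(s, 0) + 1
--     if max(rank_cnt.values()) >= 2:
--         return "discarded_pair"
--     if max(suit_cnt.values()) >= 2:
--         return "suited_cluster"
--     conn = sum(1 for r in range(NUM_RANKS - 1)
--                if r in rank_cnt and r + 1 in rank_cnt)
--     if RANK_A in rank_cnt and 0 in rank_cnt:
--         conn += 1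
--     if conn >= 2:
--         return "connected_cluster"
--     if RANK_A in rank_cnt:
--         return "high_junk"
--     if all(r <= 5 for r in rank_cnt):
--         return "low_junk"
--     return "mixed_discard"
-- ===== Notes on version B (the rewrite author's own statement) =====
-- stated objective: simpler
-- what changed: One manual counting pass builds rank/suit count dicts (no Counter, no most_common) and connections are counted by scanning rank presence for adjacent pairs instead of sorting the ranks and comparing adjacent sorted elements.
import Mathlib
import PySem

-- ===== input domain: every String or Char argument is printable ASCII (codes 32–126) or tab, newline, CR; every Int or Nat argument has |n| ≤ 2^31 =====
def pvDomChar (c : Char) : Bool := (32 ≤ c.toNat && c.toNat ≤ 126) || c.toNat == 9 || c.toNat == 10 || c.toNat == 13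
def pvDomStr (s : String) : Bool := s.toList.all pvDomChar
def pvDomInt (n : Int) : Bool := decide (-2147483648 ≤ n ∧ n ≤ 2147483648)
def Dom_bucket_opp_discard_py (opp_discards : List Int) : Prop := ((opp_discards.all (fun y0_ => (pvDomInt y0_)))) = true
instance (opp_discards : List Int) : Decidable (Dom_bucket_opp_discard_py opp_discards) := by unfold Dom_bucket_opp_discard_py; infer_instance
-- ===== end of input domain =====

-- B replaces A's Counter objects and sorted-adjacent-difference scan by one manual counting
-- pass and a rank-presence scan (objective: simpler/idiomatic single pass, no sort).

-- ===== PORT A =====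
-- _rank(c) = c % NUM_RANKS (Python floor-sign %, NUM_RANKS = 9)
def pyRank (c : Int) : Int := PySem.Int.mod c 9
-- _suit(c) = c // NUM_RANKS
def pySuit (c : Int) : Int := PySem.Int.floordiv c 9

-- Port of A. `rc.most_common(1)[0][1]` reads only the COUNT of the most common element,
-- i.e. the maximum of the counter's values (the list is nonempty here, so the `.getD 0`
-- default is never read). `sum(1 for i in … if cond)` is the sum of (if cond then 1 else 0).
def bucket_opp_discard_py (opp_discards : List Int) : String :=
  if opp_discards.length < 3 then "unknown"
  else
    let ranks := opp_discards.map pyRank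
    let suits := opp_discards.map pySuit
    let sc := PySem.Dict.counter suits
    let rc := PySem.Dict.counter ranks
    let sorted_r := PySem.List.sorted ranks (fun x => x)
    let conn0 : Int :=
      ((PySem.List.pyRange 0 (PySem.List.len sorted_r - 1) 1).map
        (fun i => if PySem.List.pyGetD sorted_r (i + 1) 0 - PySem.List.pyGetD sorted_r i 0 = 1
                  then (1 : Int) else 0)).sum
    let conn := if (8 : Int) ∈ sorted_r ∧ (0 : Int) ∈ sorted_r then conn0 + 1 else conn0
    if 2 ≤ (PySem.List.max? rc.values (fun v => v)).getD 0 then "discarded_pair"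
    else if 2 ≤ (PySem.List.max? sc.values (fun v => v)).getD 0 then "suited_cluster"
    else if 2 ≤ conn then "connected_cluster"
    else if (8 : Int) ∈ ranks then "high_junk"
    else if (PySem.List.max? ranks (fun v => v)).getD 0 ≤ 5 then "low_junk"
    else "mixed_discard"

-- ===== PORT B =====
-- Port of B (Source B): one fold builds both count dicts; conn counts adjacent present ranks.
def bucket_opp_discard_py_alt (opp_discards : List Int) : String :=
  if opp_discards.length < 3 then "unknown"
  else
    let cnts := opp_discards.foldl
      (fun (p : PySem.Dict Int Int × PySem.Dict Int Int) c =>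
        (p.1.insert (PySem.Int.mod c 9) (p.1.getD (PySem.Int.mod c 9) 0 + 1),
         p.2.insert (PySem.Int.floordiv c 9) (p.2.getD (PySem.Int.floordiv c 9) 0 + 1)))
      (PySem.Dict.empty, PySem.Dict.empty)
    let rank_cnt := cnts.1
    let suit_cnt := cnts.2
    if 2 ≤ (PySem.List.max? rank_cnt.values (fun v => v)).getD 0 then "discarded_pair"
    else if 2 ≤ (PySem.List.max? suit_cnt.values (fun v => v)).getD 0 then "suited_cluster"
    else
      let conn0 : Int :=
        ((PySem.List.pyRange 0 (9 - 1) 1).map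
          (fun r => if rank_cnt.contains r && rank_cnt.contains (r + 1) then (1 : Int) else 0)).sum
      let conn := if rank_cnt.contains 8 && rank_cnt.contains 0 then conn0 + 1 else conn0
      if 2 ≤ conn then "connected_cluster"
      else if rank_cnt.contains 8 then "high_junk"
      else if rank_cnt.keys.all (fun r => r ≤ 5) then "low_junk"
      else "mixed_discard"

-- ===== PRECONDITION & SPEC =====
def Spec_bucket_opp_discard_py (opp_discards : List Int) (out : String) : Prop := out = bucket_opp_discard_py_alt opp_discards
instance (opp_discards : List Int) (out : String) : Decidable (Spec_bucket_opp_discard_py opp_discards out) := by unfold Spec_bucket_opp_discard_py; infer_instance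

-- ===== CLAIM (what is proved, stated in full; the proofs are below) =====
def Claim_equal_bucket_opp_discard_py : Prop := ∀ (opp_discards : List Int), Dom_bucket_opp_discard_py opp_discards → Spec_bucket_opp_discard_py opp_discards (bucket_opp_discard_py opp_discards)

-- ===== LEMMAS AND PROOFS =====

-- Proof-side canonical form both ports are reduced to (for length ≥ 3).
def connMk (b0 b1 b2 b3 b4 b5 b6 b7 b8 : Bool) : Int :=
  ((if b0 && b1 then (1 : Int) else 0) + (if b1 && b2 then 1 else 0) +
   (if b2 && b3 then 1 else 0) + (if b3 && b4 then 1 else 0) +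
   (if b4 && b5 then 1 else 0) + (if b5 && b6 then 1 else 0) +
   (if b6 && b7 then 1 else 0) + (if b7 && b8 then 1 else 0)) +
  (if b8 && b0 then 1 else 0)

def bucketCore (ranks suits : List Int) : String :=
  if 2 ≤ (PySem.List.max? (PySem.Dict.counter ranks).values (fun v => v)).getD 0 then "discarded_pair"
  else if 2 ≤ (PySem.List.max? (PySem.Dict.counter suits).values (fun v => v)).getD 0 then "suited_cluster"
  else if 2 ≤ connMk (decide ((0:Int) ∈ ranks)) (decide ((1:Int) ∈ ranks)) (decide ((2:Int) ∈ ranks))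
               (decide ((3:Int) ∈ ranks)) (decide ((4:Int) ∈ ranks)) (decide ((5:Int) ∈ ranks))
               (decide ((6:Int) ∈ ranks)) (decide ((7:Int) ∈ ranks)) (decide ((8:Int) ∈ ranks))
       then "connected_cluster"
  else if (8 : Int) ∈ ranks then "high_junk"
  else if ∀ r ∈ ranks, r ≤ 5 then "low_junk"
  else "mixed_discard"

-- The strictly increasing list of present ranks, as a function of the 9 presence bits.
def mkL (b0 b1 b2 b3 b4 b5 b6 b7 b8 : Bool) : List Int :=
  (if b0 then [(0:Int)] else []) ++ (if b1 then [1] else []) ++ (if b2 then [2] else []) ++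
  (if b3 then [3] else []) ++ (if b4 then [4] else []) ++ (if b5 then [5] else []) ++
  (if b6 then [6] else []) ++ (if b7 then [7] else []) ++ (if b8 then [8] else [])

-- A's conn value computed from the sorted list.
def connOfSorted (l : List Int) : Int :=
  (((PySem.List.pyRange 0 (PySem.List.len l - 1) 1).map
      (fun i => if PySem.List.pyGetD l (i + 1) 0 - PySem.List.pyGetD l i 0 = 1
                then (1 : Int) else 0)).sum) +
  (if (8 : Int) ∈ l ∧ (0 : Int) ∈ l then 1 else 0)

theorem mkL_pairwise (b0 b1 b2 b3 b4 b5 b6 b7 b8 : Bool) :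
    (mkL b0 b1 b2 b3 b4 b5 b6 b7 b8).Pairwise (· < ·) := by
  cases b0 <;> cases b1 <;> cases b2 <;> cases b3 <;> cases b4 <;>
    cases b5 <;> cases b6 <;> cases b7 <;> cases b8 <;> decide

theorem conn_key (b0 b1 b2 b3 b4 b5 b6 b7 b8 : Bool) :
    connOfSorted (mkL b0 b1 b2 b3 b4 b5 b6 b7 b8) = connMk b0 b1 b2 b3 b4 b5 b6 b7 b8 := by
  cases b0 <;> cases b1 <;> cases b2 <;> cases b3 <;> cases b4 <;>
    cases b5 <;> cases b6 <;> cases b7 <;> cases b8 <;> decide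

theorem memIteSingle (ranks : List Int) (i a : Int)
    (h : a ∈ (if decide (i ∈ ranks) = true then [i] else [])) : a ∈ ranks := by
  by_cases hp : i ∈ ranks
  · simp [hp] at h; subst h; exact hp
  · simp [hp] at h

theorem mem_mkL (ranks : List Int) (hbd : ∀ r ∈ ranks, 0 ≤ r ∧ r < 9) (a : Int) :
    a ∈ mkL (decide ((0:Int) ∈ ranks)) (decide ((1:Int) ∈ ranks)) (decide ((2:Int) ∈ ranks))
        (decide ((3:Int) ∈ ranks)) (decide ((4:Int) ∈ ranks)) (decide ((5:Int) ∈ ranks))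
        (decide ((6:Int) ∈ ranks)) (decide ((7:Int) ∈ ranks)) (decide ((8:Int) ∈ ranks))
      ↔ a ∈ ranks := by
  constructor
  · intro h
    simp only [mkL, List.mem_append, or_assoc] at h
    rcases h with h | h | h | h | h | h | h | h | h <;> exact memIteSingle ranks _ a h
  · intro h
    obtain ⟨h0, h9⟩ := hbd a h
    have ha : a = 0 ∨ a = 1 ∨ a = 2 ∨ a = 3 ∨ a = 4 ∨ a = 5 ∨ a = 6 ∨ a = 7 ∨ a = 8 := by omega
    rcases ha with rfl | rfl | rfl | rfl | rfl | rfl | rfl | rfl | rfl <;> simp [mkL, h]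

theorem sorted_eq_mkL (ranks : List Int) (hnd : ranks.Nodup)
    (hbd : ∀ r ∈ ranks, 0 ≤ r ∧ r < 9) :
    PySem.List.sorted ranks (fun x => x) =
      mkL (decide ((0:Int) ∈ ranks)) (decide ((1:Int) ∈ ranks)) (decide ((2:Int) ∈ ranks))
        (decide ((3:Int) ∈ ranks)) (decide ((4:Int) ∈ ranks)) (decide ((5:Int) ∈ ranks))
        (decide ((6:Int) ∈ ranks)) (decide ((7:Int) ∈ ranks)) (decide ((8:Int) ∈ ranks)) := by
  apply PySem.List.sorted_eq_of_perm_of_pairwise_lt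
  · exact (List.perm_ext_iff_of_nodup
      ((mkL_pairwise _ _ _ _ _ _ _ _ _).nodup) hnd).2 (mem_mkL ranks hbd)
  · exact mkL_pairwise _ _ _ _ _ _ _ _ _

-- max count < 2 means all counts ≤ 1, i.e. the list has no duplicates.
theorem nodup_of_maxcount (ranks : List Int) (hne : ranks ≠ [])
    (h : ¬ 2 ≤ (PySem.List.max? (PySem.Dict.counter ranks).values (fun v => v)).getD 0) :
    ranks.Nodup := by
  rcases hm : PySem.List.max? (PySem.Dict.counter ranks).values (fun v => v) with _ | m
  · rw [PySem.List.max?_eq_none_iff] at hm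
    have : ranks = [] := by
      have hkeys := PySem.Dict.keys_counter ranks
      have hlen : (PySem.Dict.counter ranks).values.length = (PySem.Dict.counter ranks).keys.length := by
        simp [PySem.Dict.values, PySem.Dict.keys]
      rcases hr : ranks with _ | ⟨x, t⟩
      · rfl
      · exfalso
        have hx : x ∈ PySem.Set.ofList ranks := (PySem.Set.mem_ofList ranks x).2 (by simp [hr])
        rw [← hkeys] at hx
        have : (PySem.Dict.counter ranks).keys.length ≠ 0 := by
          intro h0; rw [List.length_eq_zero_iff] at h0; simp [h0] at hx
        rw [← hlen, hm] at this; simp at this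
    exact absurd this hne
  · rw [hm] at h
    simp only [Option.getD_some] at h
    rw [List.nodup_iff_count_le_one]
    intro a
    by_cases ha : a ∈ ranks
    · have hv : ((ranks.count a : Int)) ∈ (PySem.Dict.counter ranks).values := by
        rw [PySem.Dict.values_eq_map_keys _ (PySem.Dict.nodup_keys_counter ranks) 0]
        rw [PySem.Dict.keys_counter]
        refine List.mem_map.2 ⟨a, (PySem.Set.mem_ofList ranks a).2 ha, ?_⟩
        exact PySem.Dict.getD_counter ranks a
      have := PySem.List.max?_isMax hm _ hv
      simp only at this
      omega
    · rw [List.count_eq_zero_of_not_mem ha]; omega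

-- max of a nonempty list of ranks ≤ 5 iff every rank ≤ 5.
theorem pvMaxLe_iff (ranks : List Int) (hne : ranks ≠ []) :
    ((PySem.List.max? ranks (fun v => v)).getD 0 ≤ 5) ↔ (∀ r ∈ ranks, r ≤ 5) := by
  rcases hm : PySem.List.max? ranks (fun v => v) with _ | m
  · exact absurd ((PySem.List.max?_eq_none_iff ranks _).1 hm) hne
  · simp only [Option.getD_some]
    constructor
    · intro h r hr
      have := PySem.List.max?_isMax hm r hr
      simp only at this; omega
    · intro h; exact h m (PySem.List.max?_mem hm)

-- A reduced to the canonical form (for length ≥ 3).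
theorem A_eq (xs : List Int) (hlen : ¬ xs.length < 3) :
    bucket_opp_discard_py xs = bucketCore (xs.map pyRank) (xs.map pySuit) := by
  have hne : xs.map pyRank ≠ [] := by
    intro h; apply hlen; simp at h; simp [h]
  have hbd : ∀ r ∈ xs.map pyRank, 0 ≤ r ∧ r < 9 := by
    intro r hr
    obtain ⟨c, _, rfl⟩ := List.mem_map.1 hr
    exact ⟨PySem.Int.mod_nonneg c (by norm_num), PySem.Int.mod_lt c (by norm_num)⟩
  unfold bucket_opp_discard_py bucketCore
  rw [if_neg hlen]
  by_cases h1 : 2 ≤ (PySem.List.max? (PySem.Dict.counter (xs.map pyRank)).values (fun v => v)).getD 0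
  · simp only [if_pos h1]
  · rw [if_neg h1, if_neg h1]
    by_cases h2 : 2 ≤ (PySem.List.max? (PySem.Dict.counter (xs.map pySuit)).values (fun v => v)).getD 0
    · simp only [if_pos h2]
    · rw [if_neg h2, if_neg h2]
      have hnd : (xs.map pyRank).Nodup := nodup_of_maxcount _ hne h1
      have hs := sorted_eq_mkL (xs.map pyRank) hnd hbd
      have hconn :
          (if (8 : Int) ∈ PySem.List.sorted (xs.map pyRank) (fun x => x) ∧
              (0 : Int) ∈ PySem.List.sorted (xs.map pyRank) (fun x => x)
           then (((PySem.List.pyRange 0 (PySem.List.len (PySem.List.sorted (xs.map pyRank) (fun x => x)) - 1) 1).map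
              (fun i => if PySem.List.pyGetD (PySem.List.sorted (xs.map pyRank) (fun x => x)) (i + 1) 0 -
                          PySem.List.pyGetD (PySem.List.sorted (xs.map pyRank) (fun x => x)) i 0 = 1
                        then (1 : Int) else 0)).sum) + 1
           else (((PySem.List.pyRange 0 (PySem.List.len (PySem.List.sorted (xs.map pyRank) (fun x => x)) - 1) 1).map
              (fun i => if PySem.List.pyGetD (PySem.List.sorted (xs.map pyRank) (fun x => x)) (i + 1) 0 -
                          PySem.List.pyGetD (PySem.List.sorted (xs.map pyRank) (fun x => x)) i 0 = 1
                        then (1 : Int) else 0)).sum))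
          = connMk (decide ((0:Int) ∈ xs.map pyRank)) (decide ((1:Int) ∈ xs.map pyRank))
              (decide ((2:Int) ∈ xs.map pyRank)) (decide ((3:Int) ∈ xs.map pyRank))
              (decide ((4:Int) ∈ xs.map pyRank)) (decide ((5:Int) ∈ xs.map pyRank))
              (decide ((6:Int) ∈ xs.map pyRank)) (decide ((7:Int) ∈ xs.map pyRank))
              (decide ((8:Int) ∈ xs.map pyRank)) := by
        rw [← conn_key]
        simp only [connOfSorted]
        rw [← hs]
        split_ifs <;> ring
      rw [hconn]
      by_cases h3 : 2 ≤ connMk (decide ((0:Int) ∈ xs.map pyRank)) (decide ((1:Int) ∈ xs.map pyRank))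
              (decide ((2:Int) ∈ xs.map pyRank)) (decide ((3:Int) ∈ xs.map pyRank))
              (decide ((4:Int) ∈ xs.map pyRank)) (decide ((5:Int) ∈ xs.map pyRank))
              (decide ((6:Int) ∈ xs.map pyRank)) (decide ((7:Int) ∈ xs.map pyRank))
              (decide ((8:Int) ∈ xs.map pyRank))
      · simp only [if_pos h3]
      · rw [if_neg h3, if_neg h3]
        by_cases h4 : (8 : Int) ∈ xs.map pyRank
        · simp only [if_pos h4]
        · rw [if_neg h4, if_neg h4]
          rw [if_congr (pvMaxLe_iff _ hne) rfl rfl]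

-- B reduced to the canonical form (for length ≥ 3).
theorem B_eq (xs : List Int) (hlen : ¬ xs.length < 3) :
    bucket_opp_discard_py_alt xs = bucketCore (xs.map pyRank) (xs.map pySuit) := by
  have hcnts : xs.foldl
      (fun (p : PySem.Dict Int Int × PySem.Dict Int Int) c =>
        (p.1.insert (PySem.Int.mod c 9) (p.1.getD (PySem.Int.mod c 9) 0 + 1),
         p.2.insert (PySem.Int.floordiv c 9) (p.2.getD (PySem.Int.floordiv c 9) 0 + 1)))
      (PySem.Dict.empty, PySem.Dict.empty)
      = (PySem.Dict.counter (xs.map pyRank), PySem.Dict.counter (xs.map pySuit)) := by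
    rw [PySem.List.foldl_prod_mk
      (fun (d : PySem.Dict Int Int) (c : Int) => d.insert (PySem.Int.mod c 9) (d.getD (PySem.Int.mod c 9) 0 + 1))
      (fun (d : PySem.Dict Int Int) (c : Int) => d.insert (PySem.Int.floordiv c 9) (d.getD (PySem.Int.floordiv c 9) 0 + 1))]
    rw [← PySem.Dict.foldl_insert_getD_add_one_eq_counter (xs.map pyRank)]
    rw [← PySem.Dict.foldl_insert_getD_add_one_eq_counter (xs.map pySuit)]
    rw [List.foldl_map, List.foldl_map]
    rfl
  have hc : ∀ r : Int, (PySem.Dict.counter (xs.map pyRank)).contains r = decide (r ∈ xs.map pyRank) := by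
    intro r
    rw [PySem.Dict.contains_counter]
    simp
  unfold bucket_opp_discard_py_alt
  rw [if_neg hlen]
  simp only [hcnts]
  unfold bucketCore
  by_cases h1 : 2 ≤ (PySem.List.max? (PySem.Dict.counter (xs.map pyRank)).values (fun v => v)).getD 0
  · simp only [if_pos h1]
  · rw [if_neg h1, if_neg h1]
    by_cases h2 : 2 ≤ (PySem.List.max? (PySem.Dict.counter (xs.map pySuit)).values (fun v => v)).getD 0
    · simp only [if_pos h2]
    · rw [if_neg h2, if_neg h2]
      have hconn :
          (if (PySem.Dict.counter (xs.map pyRank)).contains 8 && (PySem.Dict.counter (xs.map pyRank)).contains 0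
           then (((PySem.List.pyRange 0 (9 - 1) 1).map
              (fun r => if (PySem.Dict.counter (xs.map pyRank)).contains r &&
                           (PySem.Dict.counter (xs.map pyRank)).contains (r + 1)
                        then (1 : Int) else 0)).sum) + 1
           else (((PySem.List.pyRange 0 (9 - 1) 1).map
              (fun r => if (PySem.Dict.counter (xs.map pyRank)).contains r &&
                           (PySem.Dict.counter (xs.map pyRank)).contains (r + 1)
                        then (1 : Int) else 0)).sum))
          = connMk (decide ((0:Int) ∈ xs.map pyRank)) (decide ((1:Int) ∈ xs.map pyRank))
              (decide ((2:Int) ∈ xs.map pyRank)) (decide ((3:Int) ∈ xs.map pyRank))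
              (decide ((4:Int) ∈ xs.map pyRank)) (decide ((5:Int) ∈ xs.map pyRank))
              (decide ((6:Int) ∈ xs.map pyRank)) (decide ((7:Int) ∈ xs.map pyRank))
              (decide ((8:Int) ∈ xs.map pyRank)) := by
        rw [show PySem.List.pyRange 0 (9 - 1) 1 = [0, 1, 2, 3, 4, 5, 6, 7] from rfl]
        simp only [List.map_cons, List.map_nil, List.sum_cons, List.sum_nil, hc]
        unfold connMk
        norm_num
        split_ifs <;> ring
      rw [hconn]
      by_cases h3 : 2 ≤ connMk (decide ((0:Int) ∈ xs.map pyRank)) (decide ((1:Int) ∈ xs.map pyRank))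
              (decide ((2:Int) ∈ xs.map pyRank)) (decide ((3:Int) ∈ xs.map pyRank))
              (decide ((4:Int) ∈ xs.map pyRank)) (decide ((5:Int) ∈ xs.map pyRank))
              (decide ((6:Int) ∈ xs.map pyRank)) (decide ((7:Int) ∈ xs.map pyRank))
              (decide ((8:Int) ∈ xs.map pyRank))
      · simp only [if_pos h3]
      · rw [if_neg h3, if_neg h3]
        have h8 : ((PySem.Dict.counter (xs.map pyRank)).contains 8 = true) ↔ ((8:Int) ∈ xs.map pyRank) := by
          rw [hc]; simp
        by_cases h4 : (8 : Int) ∈ xs.map pyRank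
        · rw [if_pos (h8.2 h4), if_pos h4]
        · rw [if_neg (fun hh => h4 (h8.1 hh)), if_neg h4]
          have hlow : ((PySem.Dict.counter (xs.map pyRank)).keys.all (fun r => decide (r ≤ 5)) = true)
              ↔ (∀ r ∈ xs.map pyRank, r ≤ 5) := by
            rw [PySem.Dict.keys_counter]
            simp only [List.all_eq_true, decide_eq_true_eq]
            constructor
            · intro h r hr; exact h r ((PySem.Set.mem_ofList _ r).2 hr)
            · intro h r hr; exact h r ((PySem.Set.mem_ofList _ r).1 hr)
          rw [if_congr hlow rfl rfl]

-- ===== VERDICT (by name: the statement is the Claim_ definition above) =====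
theorem bucket_opp_discard_py_spec : Claim_equal_bucket_opp_discard_py := by
  intro xs _
  unfold Spec_bucket_opp_discard_py
  by_cases hlen : xs.length < 3
  · unfold bucket_opp_discard_py bucket_opp_discard_py_alt
    rw [if_pos hlen, if_pos hlen]
  · rw [A_eq xs hlen, B_eq xs hlen]
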